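-- pv_equiv track=rewrite | github.com/micr0tubule/image-equation-evaluator | predict_equation.py | construct_equation
-- ===== SOURCE A (Python) =====
-- def get_sign(label):
--     return {
--         10: '+',
--         11: '-',
--         12: '*',
--         13: '/'
--     }.get(label, label)
--
-- def construct_equation(l):
--     signs = [10, 11, 12, 13]
--     equation = []
--     number = []
--     for element in l:
--         if element not in signs:
--             number.append(element)
--         else:
--             if len(number) == 0:
--                 return False
--             equation.append(''.join([str(digit) for digit in number]))
--             equation.append(get_sign(element))
--             number = []
--     equation.append(''.join([str(digit) for digit in number]))
--     return ' '.join([expression for expression in equation])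
-- ===== SOURCE B (Python) =====
-- def construct_equation(l):
--     SYM = {10: '+', 11: '-', 12: '*', 13: '/'}
--     if (l and l[0] in SYM) or any(a in SYM and b in SYM for a, b in zip(l, l[1:])):
--         return False
--     return ''.join(' %s ' % SYM[x] if x in SYM else str(x) for x in l)
-- ===== Notes on version B (the rewrite author's own statement) =====
-- stated objective: simpler
-- what changed: B drops A's mutable number/equation buffers entirely: it validates by an adjacency scan (sign at the start or two consecutive signs means False) and then emits the result as a single stateless token map joined with '' (operators padded with spaces), instead of A's stateful loop that accumulates digit buffers and joins expression pieces with ' '.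
-- outside the precondition, e.g. on construct_equation([10]): A returns False, B returns False
import Mathlib
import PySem

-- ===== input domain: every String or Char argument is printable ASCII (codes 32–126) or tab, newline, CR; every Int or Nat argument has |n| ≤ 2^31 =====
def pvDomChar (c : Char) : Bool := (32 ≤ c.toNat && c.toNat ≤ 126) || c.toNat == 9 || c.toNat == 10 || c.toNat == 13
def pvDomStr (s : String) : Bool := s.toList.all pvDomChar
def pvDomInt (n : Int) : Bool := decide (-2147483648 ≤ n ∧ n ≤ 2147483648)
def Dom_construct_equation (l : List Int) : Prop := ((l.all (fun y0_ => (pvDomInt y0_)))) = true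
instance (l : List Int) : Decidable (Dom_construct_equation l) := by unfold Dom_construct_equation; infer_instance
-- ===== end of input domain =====

-- B drops A's mutable number/equation buffers: it validates by an adjacency scan and then
-- emits the string as a stateless token map (operators padded with spaces) joined with ''
-- (objective: simpler, same O(n) cost).
-- On inputs excluded by Pre_ both Pythons return the bool False (not a string); both ports yield "" there.

-- ===== PORT A =====
-- get_sign: the dict lookup with default; only ever called on 10..13, where the default
-- (returning the int itself) is unreachable; ported as toStr for that unreachable branch.
def getSignA (label : Int) : String :=
  if label = 10 then "+"
  else if label = 11 then "-"
  else if label = 12 then "*"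
  else if label = 13 then "/"
  else PySem.Int.toStr label

-- ''.join([str(digit) for digit in number])
def joinDigitsA (number : List Int) : String :=
  PySem.Str.join "" (number.map PySem.Int.toStr)

-- the for-loop of A; `none` models the `return False` path (excluded by Pre_)
def loopA : List Int → List String → List Int → Option (List String)
  | [], equation, number => some (equation ++ [joinDigitsA number])
  | e :: rest, equation, number =>
    if e ∈ ([10, 11, 12, 13] : List Int) then
      if number.length = 0 then none
      else loopA rest (equation ++ [joinDigitsA number, getSignA e]) []
    else loopA rest equation (number ++ [e])

def construct_equation (l : List Int) : String :=
  match loopA l [] [] with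
  | none => ""                               -- Python returns False here (outside Pre_)
  | some equation => PySem.Str.join " " equation

-- ===== PORT B =====
def isSymB (x : Int) : Bool := x == 10 || x == 11 || x == 12 || x == 13

def symB (x : Int) : String :=
  if x = 10 then "+" else if x = 11 then "-" else if x = 12 then "*" else "/"

-- (l and l[0] in SYM) or any(a in SYM and b in SYM for a, b in zip(l, l[1:]))
def badB (l : List Int) : Bool :=
  (match l with | [] => false | x :: _ => isSymB x)
  || (l.zip l.tail).any (fun p => isSymB p.1 && isSymB p.2)

-- ' %s ' % SYM[x] if x in SYM else str(x)
def tokB (x : Int) : String :=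
  if isSymB x then " " ++ symB x ++ " " else PySem.Int.toStr x

def construct_equation_alt (l : List Int) : String :=
  if badB l then ""                          -- Python returns False here (outside Pre_)
  else PySem.Str.join "" (l.map tokB)

-- ===== PRECONDITION & SPEC =====
-- Pre_ excludes exactly the inputs where the Python A returns the bool False (not a string,
-- outside the declared return type): a sign label (10..13) at the head or right after another sign.
def Pre_construct_equation (l : List Int) : Prop :=
  (∀ x, l.head? = some x → x ∉ ([10, 11, 12, 13] : List Int)) ∧
  (∀ p ∈ l.zip l.tail, p.2 ∈ ([10, 11, 12, 13] : List Int) → p.1 ∉ ([10, 11, 12, 13] : List Int))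
instance (l : List Int) : Decidable (Pre_construct_equation l) := by
  unfold Pre_construct_equation; infer_instance

def pvWitness_construct_equation : List Int := [1, 2, 10, 3, 11, 4]

def Spec_construct_equation (l : List Int) (out : String) : Prop := out = construct_equation_alt l
instance (l : List Int) (out : String) : Decidable (Spec_construct_equation l out) := by
  unfold Spec_construct_equation; infer_instance

-- ===== CLAIM (what is proved, stated in full; the proofs are below) =====
def Claim_equal_construct_equation : Prop := ∀ (l : List Int), Dom_construct_equation l → Pre_construct_equation l → Spec_construct_equation l (construct_equation l)

-- ===== LEMMAS AND PROOFS =====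

theorem mem_signs_iff (x : Int) :
    x ∈ ([10, 11, 12, 13] : List Int) ↔ isSymB x = true := by
  simp [isSymB]; tauto

theorem getSignA_eq_symB (x : Int) (h : isSymB x = true) : getSignA x = symB x := by
  simp only [isSymB, Bool.or_eq_true, beq_iff_eq] at h
  rcases h with ((h | h) | h) | h <;> simp [getSignA, symB, h]

-- string join helper lemmas (via toList)
theorem join_cons_cons (sep a b : String) (r : List String) :
    PySem.Str.join sep (a :: b :: r) = a ++ sep ++ PySem.Str.join sep (b :: r) := by
  apply String.toList_inj.mp
  simp [PySem.Str.toList_join, PySem.Chars.join_cons_cons]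

theorem join_singleton (sep a : String) : PySem.Str.join sep [a] = a := by
  apply String.toList_inj.mp
  simp [PySem.Str.toList_join, PySem.Chars.join_singleton]

theorem join_empty_cons (a : String) (r : List String) :
    PySem.Str.join "" (a :: r) = a ++ PySem.Str.join "" r := by
  cases r with
  | nil =>
    apply String.toList_inj.mp
    simp [PySem.Str.toList_join, PySem.Chars.join_singleton, PySem.Chars.join_nil]
  | cons b r =>
    rw [join_cons_cons]
    apply String.toList_inj.mp
    simp

theorem join_empty_nil : PySem.Str.join "" ([] : List String) = "" := by
  apply String.toList_inj.mp
  simp [PySem.Str.toList_join, PySem.Chars.join_nil]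

theorem joinDigitsA_append_single (number : List Int) (x : Int) :
    joinDigitsA (number ++ [x]) = joinDigitsA number ++ PySem.Int.toStr x := by
  unfold joinDigitsA
  induction number with
  | nil =>
    apply String.toList_inj.mp
    simp [join_empty_cons, join_empty_nil]
  | cons y ys ih =>
    simp only [List.cons_append, List.map_cons, join_empty_cons, ih]
    apply String.toList_inj.mp
    simp

-- the pure remainder of A's loop (equation accumulator factored out)
def restL : List Int → List Int → Option (List String)
  | [], number => some [joinDigitsA number]
  | x :: xs, number =>
    if x ∈ ([10, 11, 12, 13] : List Int) then
      if number.length = 0 then none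
      else (restL xs []).map (fun r => joinDigitsA number :: getSignA x :: r)
    else restL xs (number ++ [x])

theorem loopA_eq_restL (l : List Int) : ∀ (equation : List String) (number : List Int),
    loopA l equation number = (restL l number).map (equation ++ ·) := by
  induction l with
  | nil => intro equation number; simp [loopA, restL]
  | cons x xs ih =>
    intro equation number
    by_cases hx : x ∈ ([10, 11, 12, 13] : List Int)
    · simp only [loopA, restL, if_pos hx]
      by_cases hn : number.length = 0
      · simp [hn]
      · rw [if_neg hn, if_neg hn, ih, Option.map_map]
        refine congrFun (congrArg Option.map ?_) _
        funext r
        simp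
    · simp only [loopA, restL, if_neg hx]
      exact ih _ _

def PairOK (l : List Int) : Prop :=
  ∀ p ∈ l.zip l.tail, ¬(isSymB p.1 = true ∧ isSymB p.2 = true)

theorem pairOK_tail {x : Int} {xs : List Int} (h : PairOK (x :: xs)) : PairOK xs := by
  intro p hp
  apply h
  cases xs with
  | nil => simp at hp
  | cons y ys => simp only [List.tail_cons, List.zip_cons_cons] at hp ⊢; exact .tail _ hp

theorem pairOK_head {x y : Int} {ys : List Int} (h : PairOK (x :: y :: ys)) :
    ¬(isSymB x = true ∧ isSymB y = true) :=
  h (x, y) (by simp)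

-- main invariant: under the pair condition, A's remainder joined with ' ' is the
-- digit buffer followed by B's padded-token emission.
theorem key (l : List Int) : ∀ (number : List Int),
    PairOK l →
    (number ≠ [] ∨ ∀ x, l.head? = some x → isSymB x = false) →
    ∃ r, restL l number = some r ∧ r ≠ [] ∧
      PySem.Str.join " " r = joinDigitsA number ++ PySem.Str.join "" (l.map tokB) := by
  induction l with
  | nil =>
    intro number _ _
    refine ⟨[joinDigitsA number], rfl, by simp, ?_⟩
    rw [join_singleton]
    apply String.toList_inj.mp
    simp [join_empty_nil]
  | cons x xs ih =>
    intro number hpair hhead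
    by_cases hx : isSymB x = true
    · -- x is a sign: number must be nonempty
      have hmem : x ∈ ([10, 11, 12, 13] : List Int) := (mem_signs_iff x).mpr hx
      have hne : number ≠ [] := by
        rcases hhead with h | h
        · exact h
        · exact absurd (h x rfl) (by simp [hx])
      have hlen : ¬ number.length = 0 := by simpa using hne
      have hheadxs : ∀ y, xs.head? = some y → isSymB y = false := by
        intro y hy
        cases xs with
        | nil => simp at hy
        | cons z zs =>
          simp only [List.head?_cons, Option.some.injEq] at hy
          subst hy
          cases hzy : isSymB z
          · rfl
          · exact absurd ⟨hx, hzy⟩ (pairOK_head hpair)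
      obtain ⟨r', hr', hne', hjoin'⟩ := ih [] (pairOK_tail hpair) (.inr hheadxs)
      have hx' : x = 10 ∨ x = 11 ∨ x = 12 ∨ x = 13 := by simpa using hmem
      refine ⟨joinDigitsA number :: getSignA x :: r', ?_, by simp, ?_⟩
      · simp [restL, hx', hne, hr']
      · cases r' with
        | nil => exact absurd rfl hne'
        | cons c r'' =>
          have hjd : joinDigitsA ([] : List Int) = "" := by
            apply String.toList_inj.mp
            simp [joinDigitsA, join_empty_nil]
          rw [join_cons_cons, join_cons_cons, hjoin', hjd,
              getSignA_eq_symB x hx, List.map_cons, join_empty_cons]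
          simp only [tokB, hx, if_true]
          apply String.toList_inj.mp
          simp
    · -- x is a digit: it goes into the buffer
      have hmem : x ∉ ([10, 11, 12, 13] : List Int) := fun h => hx ((mem_signs_iff x).mp h)
      obtain ⟨r, hr, hner, hjoin⟩ := ih (number ++ [x]) (pairOK_tail hpair) (.inl (by simp))
      have hx' : ¬(x = 10 ∨ x = 11 ∨ x = 12 ∨ x = 13) := by simpa using hmem
      refine ⟨r, by simp [restL, hx', hr], hner, ?_⟩
      rw [hjoin, joinDigitsA_append_single, List.map_cons, join_empty_cons, tokB, if_neg hx]
      apply String.toList_inj.mp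
      simp

theorem badB_false_of_pre {l : List Int} (h : Pre_construct_equation l) : badB l = false := by
  obtain ⟨h1, h2⟩ := h
  unfold badB
  apply Bool.or_eq_false_iff.mpr
  constructor
  · cases l with
    | nil => rfl
    | cons x xs =>
      cases hx : isSymB x
      · simpa using hx
      · exact absurd ((mem_signs_iff x).mpr hx) (h1 x rfl)
  · apply List.any_eq_false.mpr
    intro p hp
    simp only [Bool.and_eq_true, not_and]
    intro ha hb
    exact h2 p hp ((mem_signs_iff p.2).mpr hb) ((mem_signs_iff p.1).mpr ha)

theorem pre_pairOK {l : List Int} (h : Pre_construct_equation l) : PairOK l := by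
  intro p hp ⟨ha, hb⟩
  exact h.2 p hp ((mem_signs_iff p.2).mpr hb) ((mem_signs_iff p.1).mpr ha)

theorem ports_agree {l : List Int} (h : Pre_construct_equation l) :
    construct_equation l = construct_equation_alt l := by
  have hhead : ∀ x, l.head? = some x → isSymB x = false := by
    intro x hx
    cases hs : isSymB x
    · rfl
    · exact absurd ((mem_signs_iff x).mpr hs) (h.1 x hx)
  obtain ⟨r, hr, _, hjoin⟩ := key l [] (pre_pairOK h) (.inr hhead)
  unfold construct_equation construct_equation_alt
  rw [loopA_eq_restL, hr, badB_false_of_pre h]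
  simp only [Option.map_some, List.nil_append]
  rw [hjoin]
  have hjd : joinDigitsA ([] : List Int) = "" := by
    apply String.toList_inj.mp
    simp [joinDigitsA, join_empty_nil]
  rw [hjd]
  apply String.toList_inj.mp
  simp

-- ===== VERDICT (by name: the statement is the Claim_ definition above) =====
theorem construct_equation_spec : Claim_equal_construct_equation := by
  intro l _ hpre
  unfold Spec_construct_equation
  exact ports_agree hpre
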